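-- pv_equiv track=rewrite | github.com/Scr1pting/42-BWInf-Runde-1 | 3. Zauberschule/src/main.py | split_list_at_empty_elements
-- ===== SOURCE A (Python) =====
-- def split_list_at_empty_elements(input_list: list) -> list:
--     """Splits a list into into a more dimensional list at an empty elements, like [].
--
--     Args:
--         input_list (list): input list
--
--     Returns:
--         list: splitted list
--     """
--     result = []
--     sub_list = []
--
--     # Iterate ove input list
--     for item in input_list:
--         # If item is empty, add it the sublist to the result
--         if not item:
--             if sub_list:  # Avoid adding empty sublists when two elements are empty
--                 result.append(sub_list)
--             sub_list = []  # Start a new sublist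
--         else:
--             # Otherwise add the element to the sublist
--             sub_list.append(item)
--
--     if sub_list:  # Add the last sublist if not empty
--         result.append(sub_list)
--
--     return result
-- ===== SOURCE B (Python) =====
-- def split_list_at_empty_elements(input_list: list) -> list:
--     """Splits a list into a more dimensional list at empty elements."""
--     result = []
--     i = 0
--     n = len(input_list)
--     while i < n:
--         if not input_list[i]:
--             i += 1  # skip falsy separators
--         else:
--             j = i
--             while j < n and input_list[j]:
--                 j += 1
--             result.append(input_list[i:j])  # maximal truthy run
--             i = j
--     return result
-- ===== Notes on version B (the rewrite author's own statement) =====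
-- stated objective: alternative
-- what changed: Replaces the item-by-item scan with a mutable sub_list accumulator by a run-finding scan that locates each maximal run of truthy elements with an inner index advance and appends the slice directly, so no partial sublist state is ever carried between iterations.
import Mathlib
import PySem

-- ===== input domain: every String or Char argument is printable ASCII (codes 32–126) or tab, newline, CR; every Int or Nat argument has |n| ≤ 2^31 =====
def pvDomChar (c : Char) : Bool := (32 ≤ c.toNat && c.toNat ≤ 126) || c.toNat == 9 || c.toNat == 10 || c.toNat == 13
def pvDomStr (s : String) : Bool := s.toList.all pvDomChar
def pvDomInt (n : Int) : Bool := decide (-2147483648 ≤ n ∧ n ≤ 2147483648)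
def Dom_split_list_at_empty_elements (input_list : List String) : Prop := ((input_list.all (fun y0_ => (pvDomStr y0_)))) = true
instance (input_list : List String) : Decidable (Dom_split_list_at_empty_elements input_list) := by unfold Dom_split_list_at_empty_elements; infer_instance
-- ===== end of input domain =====

-- B replaces A's accumulator scan by a run-finding scan (takeWhile/dropWhile over maximal truthy runs); alternative decomposition, same cost.

-- ===== PORT A =====
-- the for-loop of A: state is (result, sub_list)
def splitLoopA : List String → List (List String) → List String → List (List String)
  | [], result, sub_list =>
      if sub_list ≠ [] then result ++ [sub_list] else result
  | item :: rest, result, sub_list =>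
      if item = "" then
        if sub_list ≠ [] then splitLoopA rest (result ++ [sub_list]) []
        else splitLoopA rest result []
      else splitLoopA rest result (sub_list ++ [item])

def split_list_at_empty_elements (input_list : List String) : List (List String) :=
  splitLoopA input_list [] []

-- ===== PORT B =====
-- run-finding scan: skip falsy separators; otherwise take the maximal truthy run as one slice
def split_list_at_empty_elements_alt (input_list : List String) : List (List String) :=
  match input_list with
  | [] => []
  | x :: xs =>
      if x = "" then split_list_at_empty_elements_alt xs
      else
        (x :: xs).takeWhile (· ≠ "") :: split_list_at_empty_elements_alt ((x :: xs).dropWhile (· ≠ ""))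
termination_by input_list.length
decreasing_by
  · simp
  · simp only [List.dropWhile]
    split
    · calc (xs.dropWhile (· ≠ "")).length ≤ xs.length := List.length_dropWhile_le ..
        _ < (x :: xs).length := by simp
    · simp_all

-- ===== PRECONDITION & SPEC =====
def Spec_split_list_at_empty_elements (input_list : List String) (out : List (List String)) : Prop := out = split_list_at_empty_elements_alt input_list
instance (input_list : List String) (out : List (List String)) : Decidable (Spec_split_list_at_empty_elements input_list out) := by unfold Spec_split_list_at_empty_elements; infer_instance

-- ===== CLAIM (what is proved, stated in full; the proofs are below) =====
def Claim_equal_split_list_at_empty_elements : Prop := ∀ (input_list : List String), Dom_split_list_at_empty_elements input_list → Spec_split_list_at_empty_elements input_list (split_list_at_empty_elements input_list)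

-- ===== LEMMAS AND PROOFS =====

theorem splitLoopA_res (xs : List String) : ∀ (res : List (List String)) (sub : List String),
    splitLoopA xs res sub = res ++ splitLoopA xs [] sub := by
  induction xs with
  | nil => intro res sub; simp [splitLoopA]; split <;> simp
  | cons x xs ih =>
    intro res sub
    simp only [splitLoopA]
    split
    · split
      · rw [ih (res ++ [sub]), ih ([] ++ [sub])]; simp
      · exact ih res []
    · exact ih res (sub ++ [x])

theorem splitLoopA_alt (xs : List String) :
    (∀ (sub : List String), sub ≠ [] →
      splitLoopA xs [] sub = (sub ++ xs.takeWhile (· ≠ "")) :: split_list_at_empty_elements_alt (xs.dropWhile (· ≠ ""))) ∧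
    splitLoopA xs [] [] = split_list_at_empty_elements_alt xs := by
  induction xs with
  | nil =>
    constructor
    · intro sub h; simp [splitLoopA, split_list_at_empty_elements_alt, h]
    · simp [splitLoopA, split_list_at_empty_elements_alt]
  | cons x xs ih =>
    constructor
    · intro sub h
      simp only [splitLoopA]
      by_cases hx : x = ""
      · rw [hx, if_pos rfl, if_pos h, splitLoopA_res, ih.2]
        simp [List.takeWhile, List.dropWhile, split_list_at_empty_elements_alt]
      · rw [if_neg hx, (ih.1 (sub ++ [x]) (by simp))]
        simp [List.takeWhile, List.dropWhile, hx]
    · simp only [splitLoopA]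
      by_cases hx : x = ""
      · simp only [hx, if_pos]
        rw [if_neg (by simp), ih.2]
        simp [split_list_at_empty_elements_alt]
      · rw [if_neg hx, show ([] : List String) ++ [x] = [x] from rfl, ih.1 [x] (by simp)]
        conv_rhs => rw [split_list_at_empty_elements_alt]
        simp [hx, List.takeWhile, List.dropWhile]

-- ===== VERDICT (by name: the statement is the Claim_ definition above) =====
theorem split_list_at_empty_elements_spec : Claim_equal_split_list_at_empty_elements := by
  intro input_list _
  unfold Spec_split_list_at_empty_elements split_list_at_empty_elements
  exact (splitLoopA_alt input_list).2
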